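-- pv_equiv track=rewrite | github.com/vicvv/algo | dynamic/max_expressions.py | maximizeExpression
-- ===== SOURCE A (Python) =====
-- def maximizeExpression(array):
--     if len(array) < 4:
--         return 0
--     maximumValueFound = float("-inf")
--     for a in range(len(array)):
--         aValue = array[a]
--         for b in range(a + 1, len(array)):
--             bValue = array[b]
--             for c in range(b + 1, len(array)):
--                 cValue = array[c]
--                 for d in range(c + 1, len(array)):
--                     dValue = array[d]
--                     expressionValue = evaluateExpression(aValue, bValue, cValue, dValue)
--                     maximumValueFound = max(expressionValue, maximumValueFound)
--     return maximumValueFound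
--
-- def evaluateExpression(a, b, c, d):
--     return a - b + c - d
-- ===== SOURCE B (Python) =====
-- def maximizeExpression(array):
--     if len(array) < 4:
--         return 0
--     best_a = None
--     best_ab = None
--     best_abc = None
--     best_abcd = None
--     for x in array:
--         if best_abc is not None:
--             v = best_abc - x
--             best_abcd = v if best_abcd is None else max(best_abcd, v)
--         if best_ab is not None:
--             v = best_ab + x
--             best_abc = v if best_abc is None else max(best_abc, v)
--         if best_a is not None:
--             v = best_a - x
--             best_ab = v if best_ab is None else max(best_ab, v)
--         best_a = x if best_a is None else max(best_a, x)
--     return best_abcd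
-- ===== Notes on version B (the rewrite author's own statement) =====
-- stated objective: faster
-- what changed: Replaced the four nested index loops (all ordered quadruples) by a single left-to-right DP pass maintaining the best prefix values of a, a-b, a-b+c and a-b+c-d.
import Mathlib
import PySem

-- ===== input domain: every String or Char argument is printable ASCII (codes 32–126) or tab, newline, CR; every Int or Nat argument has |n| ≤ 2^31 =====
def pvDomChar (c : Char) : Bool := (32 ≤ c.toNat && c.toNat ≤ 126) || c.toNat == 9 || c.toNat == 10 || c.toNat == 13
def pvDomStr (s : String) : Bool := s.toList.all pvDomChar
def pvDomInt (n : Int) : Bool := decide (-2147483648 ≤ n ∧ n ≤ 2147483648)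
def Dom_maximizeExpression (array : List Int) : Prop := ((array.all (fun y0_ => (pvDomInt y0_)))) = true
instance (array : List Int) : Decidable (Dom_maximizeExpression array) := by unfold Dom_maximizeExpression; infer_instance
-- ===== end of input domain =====

-- B replaces A's four nested loops over ordered index quadruples by a one-pass DP
-- keeping the best prefix values of a, a-b, a-b+c, a-b+c-d (objective: faster).

-- ===== PORT A =====
-- 'maximumValueFound' starts at float("-inf"): modelled as 'none'; max(v, found) with found = -inf gives v.
def pvMax (m : Option Int) (v : Int) : Option Int :=
  some (match m with | none => v | some w => max v w)

-- 'for d in range(c+1, len(array))': the elements after position c, in order, i.e. the suffix 'rest'.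
def pvLoopD (aV bV cV : Int) (rest : List Int) (m : Option Int) : Option Int :=
  rest.foldl (fun m dV => pvMax m (aV - bV + cV - dV)) m

-- 'for c in range(b+1, len(array))': each later element together with its own suffix.
def pvLoopC (aV bV : Int) : List Int → Option Int → Option Int
  | [], m => m
  | cV :: rest, m => pvLoopC aV bV rest (pvLoopD aV bV cV rest m)

def pvLoopB (aV : Int) : List Int → Option Int → Option Int
  | [], m => m
  | bV :: rest, m => pvLoopB aV rest (pvLoopC aV bV rest m)

def pvLoopA : List Int → Option Int → Option Int
  | [], m => m
  | aV :: rest, m => pvLoopA rest (pvLoopB aV rest m)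

def maximizeExpression (array : List Int) : Int :=
  if array.length < 4 then 0
  else match pvLoopA array none with
    | some v => v
    | none => 0   -- unreachable: with length ≥ 4 the loops update the maximum at least once

-- ===== PORT B =====
-- one DP step of Source B's loop body: update best_abcd from best_abc, then best_abc, best_ab, best_a.
def pvStep (s : Option Int × Option Int × Option Int × Option Int) (x : Int) :
    Option Int × Option Int × Option Int × Option Int :=
  let (a, ab, abc, abcd) := s
  let abcd := match abc with
    | none => abcd
    | some u => some (match abcd with | none => u - x | some w => max w (u - x))
  let abc := match ab with
    | none => abc
    | some u => some (match abc with | none => u + x | some w => max w (u + x))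
  let ab := match a with
    | none => ab
    | some u => some (match ab with | none => u - x | some w => max w (u - x))
  let a := some (match a with | none => x | some w => max w x)
  (a, ab, abc, abcd)

def maximizeExpression_alt (array : List Int) : Int :=
  if array.length < 4 then 0
  else match (array.foldl pvStep (none, none, none, none)).2.2.2 with
    | some v => v
    | none => 0   -- unreachable: with length ≥ 4 best_abcd is set

-- ===== PRECONDITION & SPEC =====
def Spec_maximizeExpression (array : List Int) (out : Int) : Prop := out = maximizeExpression_alt array
instance (array : List Int) (out : Int) : Decidable (Spec_maximizeExpression array out) := by unfold Spec_maximizeExpression; infer_instance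

-- ===== CLAIM (what is proved, stated in full; the proofs are below) =====
def Claim_equal_maximizeExpression : Prop := ∀ (array : List Int), Dom_maximizeExpression array → Spec_maximizeExpression array (maximizeExpression array)

-- ===== LEMMAS AND PROOFS =====

-- canonical option-max (B's argument order) and the fold it induces
def pvOmax (m : Option Int) (v : Int) : Option Int :=
  some (match m with | none => v | some w => max w v)

def pvFold (m : Option Int) (l : List Int) : Option Int := l.foldl pvOmax m

-- sign of the (k+1)-th element of a tuple in a - b + c - d
def pvSign : Nat → Int → Int
  | 0, x => x
  | k+1, x => -(pvSign k x)

-- values a₁ - (a₂ - (a₃ - …)) of all increasing k-tuples of the list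
def pvVals : Nat → List Int → List Int
  | 0, _ => [0]
  | _+1, [] => []
  | k+1, x :: r => (pvVals k r).map (fun v => x - v) ++ pvVals (k+1) r

def pvM (k : Nat) (p : List Int) : Option Int := pvFold none (pvVals k p)

lemma pvMax_eq (m : Option Int) (v : Int) : pvMax m v = pvOmax m v := by
  cases m <;> simp [pvMax, pvOmax, max_comm]

lemma pvOmax_right_comm (m : Option Int) (a b : Int) :
    pvOmax (pvOmax m a) b = pvOmax (pvOmax m b) a := by
  cases m <;> simp [pvOmax, max_comm, max_left_comm]

lemma pvFold_append (m : Option Int) (l₁ l₂ : List Int) :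
    pvFold m (l₁ ++ l₂) = pvFold (pvFold m l₁) l₂ := by
  simp [pvFold, List.foldl_append]

lemma pvFold_omax_swap (l : List Int) : ∀ (m : Option Int) (a : Int),
    pvFold (pvOmax m a) l = pvOmax (pvFold m l) a := by
  induction l with
  | nil => intro m a; rfl
  | cons v t ih =>
    intro m a
    simp only [pvFold, List.foldl_cons] at *
    rw [pvOmax_right_comm, ih]

lemma pvFold_perm {l₁ l₂ : List Int} (h : l₁.Perm l₂) :
    ∀ m, pvFold m l₁ = pvFold m l₂ := by
  induction h with
  | nil => intro m; rfl
  | cons x _ ih => intro m; simp only [pvFold, List.foldl_cons] at *; exact ih _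
  | swap x y l => intro m; simp only [pvFold, List.foldl_cons]; rw [pvOmax_right_comm]
  | trans _ _ ih₁ ih₂ => intro m; rw [ih₁, ih₂]

lemma pvVals_snoc_perm (x : Int) : ∀ (p : List Int) (k : Nat),
    (pvVals (k+1) (p ++ [x])).Perm
      (pvVals (k+1) p ++ (pvVals k p).map (fun v => v + pvSign k x)) := by
  intro p
  induction p with
  | nil =>
    intro k
    cases k with
    | zero => simp [pvVals, pvSign]
    | succ k => simp [pvVals]
  | cons y p ih =>
    intro k
    cases k with
    | zero =>
      simpa [pvVals, pvSign] using ((ih 0).cons (y - 0))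
    | succ k =>
      have h1 : pvVals (k+2) ((y :: p) ++ [x])
          = (pvVals (k+1) (p ++ [x])).map (fun v => y - v) ++ pvVals (k+2) (p ++ [x]) := by
        simp [pvVals]
      rw [h1]
      refine List.Perm.trans (List.Perm.append ((ih k).map _) (ih (k+1))) ?_
      have hfun : (fun v : Int => y - (v + pvSign k x)) = (fun v : Int => (y - v) + pvSign (k+1) x) := by
        funext v; simp [pvSign]; ring
      simp only [List.map_append, List.map_map, Function.comp_def, pvVals, List.append_assoc, hfun]
      exact List.Perm.append_left _ (List.perm_append_comm_assoc _ _ _)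

lemma pvFold_map_add : ∀ (l : List Int) (m : Option Int) (c : Int),
    pvFold m (l.map (fun v => v + c))
      = match pvFold none l with | none => m | some u => pvOmax m (u + c) := by
  intro l
  induction l with
  | nil => intro m c; rfl
  | cons v t ih =>
    intro m c
    simp only [List.map_cons, pvFold, List.foldl_cons]
    rw [show (t.map (fun v => v + c)).foldl pvOmax (pvOmax m (v + c))
          = pvFold (pvOmax m (v + c)) (t.map (fun v => v + c)) from rfl, ih]
    rw [show (t.foldl pvOmax (pvOmax none v)) = pvFold (pvOmax none v) t from rfl,
        pvFold_omax_swap]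
    cases h : pvFold none t with
    | none => simp [pvOmax]
    | some u =>
      cases m <;> simp [pvOmax] <;> omega

lemma pvM_snoc (k : Nat) (p : List Int) (x : Int) :
    pvM (k+1) (p ++ [x])
      = match pvM k p with
        | none => pvM (k+1) p
        | some u => pvOmax (pvM (k+1) p) (u + pvSign k x) := by
  unfold pvM
  rw [pvFold_perm (pvVals_snoc_perm x p k), pvFold_append]
  exact pvFold_map_add _ _ _

lemma pvM0 (p : List Int) : pvM 0 p = some 0 := by
  simp [pvM, pvVals, pvFold, pvOmax]

lemma pvStep_M (p : List Int) (x : Int) :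
    pvStep (pvM 1 p, pvM 2 p, pvM 3 p, pvM 4 p) x
      = (pvM 1 (p ++ [x]), pvM 2 (p ++ [x]), pvM 3 (p ++ [x]), pvM 4 (p ++ [x])) := by
  have h0 := pvM_snoc 0 p x
  have h1 := pvM_snoc 1 p x
  have h2 := pvM_snoc 2 p x
  have h3 := pvM_snoc 3 p x
  rw [pvM0] at h0
  simp only [pvSign] at h0 h1 h2 h3
  rw [h0, h1, h2, h3]
  cases pvM 1 p <;> cases pvM 2 p <;> cases pvM 3 p <;>
    simp [pvStep, pvOmax, sub_eq_add_neg]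

lemma pvB_inv : ∀ p : List Int,
    p.foldl pvStep (none, none, none, none) = (pvM 1 p, pvM 2 p, pvM 3 p, pvM 4 p) := by
  intro p
  induction p using List.reverseRecOn with
  | nil => simp [pvM, pvVals, pvFold]
  | append_singleton p x ih =>
    rw [List.foldl_append, List.foldl_cons, List.foldl_nil, ih, pvStep_M]

lemma pvVals_one (r : List Int) : pvVals 1 r = r := by
  induction r with
  | nil => rfl
  | cons x t ih => simp [pvVals, ih]

lemma foldl_pvMax (f : Int → Int) : ∀ (rest : List Int) (m : Option Int),
    rest.foldl (fun m d => pvMax m (f d)) m = pvFold m (rest.map f) := by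
  intro rest
  induction rest with
  | nil => intro m; rfl
  | cons d t ih => intro m; simp only [List.foldl_cons, List.map_cons, pvFold] at *; rw [pvMax_eq, ih]

lemma pvLoopD_eq (a b c : Int) (rest : List Int) (m : Option Int) :
    pvLoopD a b c rest m = pvFold m (rest.map (fun d => a - b + c - d)) := by
  simp [pvLoopD, foldl_pvMax]

lemma pvLoopC_eq (a b : Int) : ∀ (rest : List Int) (m : Option Int),
    pvLoopC a b rest m = pvFold m ((pvVals 2 rest).map (fun v => a - b + v)) := by
  intro rest
  induction rest with
  | nil => intro m; rfl
  | cons c r ih =>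
    intro m
    have hfun : (fun v : Int => a - b + (c - v)) = (fun d : Int => a - b + c - d) := by
      funext v; ring
    simp only [pvLoopC, ih, pvLoopD_eq, pvVals, List.map_append, pvFold_append,
      List.map_map, Function.comp_def, pvVals_one, hfun]

lemma pvLoopB_eq (a : Int) : ∀ (rest : List Int) (m : Option Int),
    pvLoopB a rest m = pvFold m ((pvVals 3 rest).map (fun v => a - v)) := by
  intro rest
  induction rest with
  | nil => intro m; rfl
  | cons b r ih =>
    intro m
    have hfun : (fun v : Int => a - (b - v)) = (fun v : Int => a - b + v) := by
      funext v; ring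
    simp only [pvLoopB, ih, pvLoopC_eq, pvVals, List.map_append, pvFold_append,
      List.map_map, Function.comp_def, hfun]

lemma pvLoopA_eq : ∀ (xs : List Int) (m : Option Int),
    pvLoopA xs m = pvFold m (pvVals 4 xs) := by
  intro xs
  induction xs with
  | nil => intro m; rfl
  | cons a r ih =>
    intro m
    simp only [pvLoopA, ih, pvLoopB_eq, pvVals, pvFold_append]

-- ===== VERDICT (by name: the statement is the Claim_ definition above) =====
theorem maximizeExpression_spec : Claim_equal_maximizeExpression := by
  intro array _
  unfold Spec_maximizeExpression maximizeExpression maximizeExpression_alt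
  by_cases h : array.length < 4
  · simp [h]
  · simp only [h, if_false]
    rw [pvLoopA_eq, pvB_inv]
    rfl
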